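-- pv_equiv track=rewrite | github.com/nablarch/nabledge-dev | tools/rbkc/scripts/verify/verify.py | _useful_width
-- ===== SOURCE A (Python) =====
-- def _useful_width(rows: list[list[str]], body_start: int) -> int:
--     width = max((len(r) for r in rows), default=0)
--     used = [False] * width
--     for r in rows[body_start:]:
--         for cx in range(min(width, len(r))):
--             if r[cx]:
--                 used[cx] = True
--     return sum(1 for u in used if u)
-- ===== SOURCE B (Python) =====
-- def _useful_width(rows: list[list[str]], body_start: int) -> int:
--     width = max((len(r) for r in rows), default=0)
--     body = rows[body_start:]
--     return sum(1 for cx in range(width)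
--                if any(cx < len(r) and r[cx] for r in body))
-- ===== Notes on version B (the rewrite author's own statement) =====
-- stated objective: alternative
-- what changed: Replaces the row-major sweep that maintains a per-column used[] boolean array with a column-major scan: for each column index an any() over the body rows short-circuits at the first non-empty cell, so no accumulator array is built or mutated.
import Mathlib
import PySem

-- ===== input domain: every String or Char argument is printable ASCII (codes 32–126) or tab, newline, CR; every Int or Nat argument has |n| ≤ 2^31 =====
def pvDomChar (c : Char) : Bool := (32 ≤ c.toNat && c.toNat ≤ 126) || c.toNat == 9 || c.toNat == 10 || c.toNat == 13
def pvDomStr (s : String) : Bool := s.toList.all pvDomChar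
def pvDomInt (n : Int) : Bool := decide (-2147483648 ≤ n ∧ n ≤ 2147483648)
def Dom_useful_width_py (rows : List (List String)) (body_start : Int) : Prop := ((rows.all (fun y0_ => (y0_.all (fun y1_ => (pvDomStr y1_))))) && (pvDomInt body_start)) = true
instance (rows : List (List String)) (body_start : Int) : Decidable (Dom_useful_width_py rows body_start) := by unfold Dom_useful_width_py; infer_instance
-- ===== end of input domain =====

-- B replaces A's row-major sweep with a mutated used[] array by a column-major any()-scan per column (alternative decomposition, same cost).


-- ===== PORT A =====
-- width = max((len(r) for r in rows), default=0); used = [False]*width;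
-- row-major double loop setting used[cx]; return sum(1 for u in used if u)
def pyStepCell (r : List String) (u : List Bool) (cx : Nat) : List Bool :=
  if r.getD cx "" ≠ "" then u.set cx true else u

def pyStepRow (width : Nat) (u : List Bool) (r : List String) : List Bool :=
  (List.range (Nat.min width r.length)).foldl (pyStepCell r) u

def useful_width_py (rows : List (List String)) (body_start : Int) : Int :=
  let width : Nat := (rows.map List.length).foldl Nat.max 0
  let used : List Bool := List.replicate width false
  let used := (PySem.List.slice rows (some body_start) none).foldl (pyStepRow width) used
  used.foldl (fun s u => if u then s + 1 else s) (0 : Int)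

-- ===== PORT B =====
-- width as in A; body = rows[body_start:];
-- sum(1 for cx in range(width) if any(cx < len(r) and r[cx] for r in body))
def useful_width_py_alt (rows : List (List String)) (body_start : Int) : Int :=
  let width : Nat := (rows.map List.length).foldl Nat.max 0
  let body := PySem.List.slice rows (some body_start) none
  ((List.range width).countP
      (fun cx => body.any (fun r => decide (cx < r.length) && decide (r.getD cx "" ≠ ""))) : Int)

-- ===== PRECONDITION & SPEC =====
def Spec_useful_width_py (rows : List (List String)) (body_start : Int) (out : Int) : Prop := out = useful_width_py_alt rows body_start
instance (rows : List (List String)) (body_start : Int) (out : Int) : Decidable (Spec_useful_width_py rows body_start out) := by unfold Spec_useful_width_py; infer_instance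

-- ===== CLAIM (what is proved, stated in full; the proofs are below) =====
def Claim_equal_useful_width_py : Prop := ∀ (rows : List (List String)) (body_start : Int), Dom_useful_width_py rows body_start → Spec_useful_width_py rows body_start (useful_width_py rows body_start)

-- ===== LEMMAS AND PROOFS =====

theorem stepCell_length (r : List String) (u : List Bool) (cx : Nat) :
    (pyStepCell r u cx).length = u.length := by
  unfold pyStepCell; split <;> simp

theorem inner_length (r : List String) (n : Nat) (u : List Bool) :
    ((List.range n).foldl (pyStepCell r) u).length = u.length := by
  induction n generalizing u with
  | zero => simp
  | succ n ih =>
      rw [List.range_succ, List.foldl_append, List.foldl_cons, List.foldl_nil,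
        stepCell_length, ih]

-- pointwise effect of one cell step
theorem stepCell_getD (r : List String) (u : List Bool) (cx j : Nat) (h : cx < u.length) :
    (pyStepCell r u cx).getD j false
      = (u.getD j false || (decide (j = cx) && decide (r.getD cx "" ≠ ""))) := by
  unfold pyStepCell
  by_cases hcell : r.getD cx "" ≠ ""
  · rw [if_pos hcell]
    by_cases hj : j = cx
    · subst hj
      rw [List.getD_eq_getElem?_getD, List.getElem?_set_self h]
      simp
      exact Or.inr hcell
    · rw [List.getD_eq_getElem?_getD, List.getElem?_set_ne (by omega)]
      simp [hj]
  · rw [if_neg hcell]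
    simp at hcell
    simp [hcell]

-- pointwise effect of the inner (per-row) loop
theorem inner_getD (r : List String) (n : Nat) (u : List Bool) (j : Nat) (hn : n ≤ u.length) :
    ((List.range n).foldl (pyStepCell r) u).getD j false
      = (u.getD j false || (decide (j < n) && decide (r.getD j "" ≠ ""))) := by
  induction n generalizing u with
  | zero => simp
  | succ n ih =>
      rw [List.range_succ, List.foldl_append, List.foldl_cons, List.foldl_nil]
      have hlen : ((List.range n).foldl (pyStepCell r) u).length = u.length :=
        inner_length r n u
      rw [stepCell_getD r _ n j (by omega), ih u (Nat.le_of_succ_le hn)]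
      by_cases hj : j = n
      · subst hj; simp
      · by_cases hjn : j < n
        · simp [hjn, Nat.lt_succ_of_lt hjn, hj]
        · have h3 : ¬ j < n + 1 := by omega
          simp [hjn, h3, hj]

theorem row_length (width : Nat) (u : List Bool) (r : List String) :
    (pyStepRow width u r).length = u.length := by
  unfold pyStepRow; exact inner_length r _ u

theorem outer_length (width : Nat) (body : List (List String)) (u : List Bool) :
    (body.foldl (pyStepRow width) u).length = u.length := by
  induction body generalizing u with
  | nil => rfl
  | cons r body ih => rw [List.foldl_cons, ih, row_length]

-- pointwise effect of the outer (row) loop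
theorem outer_getD (width : Nat) (body : List (List String)) (u : List Bool)
    (hu : u.length = width) (j : Nat) :
    (body.foldl (pyStepRow width) u).getD j false
      = (u.getD j false ||
          body.any (fun r => decide (j < Nat.min width r.length) && decide (r.getD j "" ≠ ""))) := by
  induction body generalizing u with
  | nil => simp
  | cons r body ih =>
      rw [List.foldl_cons, List.any_cons,
        ih (pyStepRow width u r) (by rw [row_length, hu])]
      unfold pyStepRow
      rw [inner_getD r _ u j (by rw [hu]; exact Nat.min_le_left _ _), Bool.or_assoc]

-- the counting foldl is countP
theorem foldl_count (l : List Bool) (s : Int) :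
    l.foldl (fun s u => if u then s + 1 else s) s = s + (l.countP id : Int) := by
  induction l generalizing s with
  | nil => simp
  | cons b l ih =>
      rw [List.foldl_cons, List.countP_cons]
      cases b
      · simp [ih]
      · rw [if_pos rfl, ih, if_pos (show id true = true from rfl)]
        push_cast
        ring

-- a Bool list is the map of getD over range of its length
theorem map_getD_range (l : List Bool) :
    (List.range l.length).map (fun j => l.getD j false) = l := by
  induction l with
  | nil => simp
  | cons b l ih =>
      rw [List.length_cons, List.range_succ_eq_map, List.map_cons, List.map_map]
      have hm : (List.range l.length).map ((fun j => (b :: l).getD j false) ∘ Nat.succ)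
          = (List.range l.length).map (fun j => l.getD j false) := by
        apply List.map_congr_left; intro j _; simp
      rw [hm, ih]
      rfl

theorem countP_id_eq (l : List Bool) :
    l.countP id = (List.range l.length).countP (fun j => l.getD j false) := by
  conv_lhs => rw [← map_getD_range l]
  rw [List.countP_map]
  rfl

-- ===== VERDICT (by name: the statement is the Claim_ definition above) =====
theorem useful_width_py_spec : Claim_equal_useful_width_py := by
  intro rows body_start _
  unfold Spec_useful_width_py useful_width_py useful_width_py_alt
  set width : Nat := (rows.map List.length).foldl Nat.max 0 with hw
  set body := PySem.List.slice rows (some body_start) none with hb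
  simp only []
  rw [foldl_count, countP_id_eq, outer_length, List.length_replicate]
  rw [zero_add, Nat.cast_inj]
  apply List.countP_congr
  intro j hj
  rw [List.mem_range] at hj
  rw [outer_getD width body (List.replicate width false) (by simp) j]
  have hrep : (List.replicate width false).getD j false = false := by
    simp [List.getD_eq_getElem?_getD, hj]
  have hpred : (body.any fun r => decide (j < Nat.min width r.length) && decide (r.getD j "" ≠ ""))
      = (body.any fun r => decide (j < r.length) && decide (r.getD j "" ≠ "")) := by
    congr 1
    funext r
    congr 1
    rw [decide_eq_decide, Nat.lt_min]
    exact ⟨fun h => h.2, fun h => ⟨hj, h⟩⟩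
  rw [hrep, Bool.false_or, hpred]
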